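-- pv_equiv track=rewrite | github.com/guru-kalinga/Automated-Invoice-Data-Extraction-using-Python | coding/extract_invoices.py.py | clean_item_description
-- ===== SOURCE A (Python) =====
-- def clean_item_description(desc):
--     # Remove everything after 'Shipping Charges', 'Shipping and Handling', 'Charges', or similar non-product keywords
--     if not isinstance(desc, str):
--         return desc
--     keywords = [
--         'shipping and handling', 'shipping charges', 'shipping', 'charges', 'total', 'grand total', 'handling', 'invoice summary', 'tax summary', 'authorized signatory', 'signature', 'declaration', 'returns policy', 'regd. office', 'contact flipkart', 'contact amazon', 'customer care', 'www.flipkart.com/helpcentre', 'www.amazon.in'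
--     ]
--     desc_lower = desc.lower()
--     min_idx = len(desc)
--     for kw in keywords:
--         idx = desc_lower.find(kw)
--         if idx != -1 and idx < min_idx:
--             min_idx = idx
--     return desc[:min_idx].strip() if min_idx != len(desc) else desc.strip()
-- ===== SOURCE B (Python) =====
-- _KEYWORDS = (
--     'shipping and handling', 'shipping charges', 'shipping', 'charges', 'total',
--     'grand total', 'handling', 'invoice summary', 'tax summary', 'authorized signatory',
--     'signature', 'declaration', 'returns policy', 'regd. office', 'contact flipkart',
--     'contact amazon', 'customer care', 'www.flipkart.com/helpcentre', 'www.amazon.in',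
-- )
--
-- def clean_item_description(desc):
--     # Single left-to-right scan: stop at the first position where any keyword starts.
--     if not isinstance(desc, str):
--         return desc
--     low = desc.lower()
--     for i in range(len(low)):
--         if low.startswith(_KEYWORDS, i):
--             return desc[:i].strip()
--     return desc.strip()
-- ===== Notes on version B (the rewrite author's own statement) =====
-- stated objective: alternative
-- what changed: A runs str.find once per keyword and keeps the minimum hit index; B does one left-to-right scan over positions and truncates at the first position where startswith matches any keyword (a tuple-argument startswith), so the min-tracking fold disappears.
import Mathlib
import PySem

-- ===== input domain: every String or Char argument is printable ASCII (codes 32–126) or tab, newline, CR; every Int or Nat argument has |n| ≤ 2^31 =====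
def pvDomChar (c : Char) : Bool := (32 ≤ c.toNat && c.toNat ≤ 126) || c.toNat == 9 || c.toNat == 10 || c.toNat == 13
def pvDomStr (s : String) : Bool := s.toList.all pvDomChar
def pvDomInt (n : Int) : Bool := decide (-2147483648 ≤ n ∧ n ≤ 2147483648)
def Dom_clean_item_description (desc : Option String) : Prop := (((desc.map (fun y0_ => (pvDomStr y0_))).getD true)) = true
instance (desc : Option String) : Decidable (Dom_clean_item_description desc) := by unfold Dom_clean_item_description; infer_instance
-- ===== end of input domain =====

-- B replaces A's per-keyword find-and-minimise with a single left-to-right position scan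
-- that stops at the first index where any keyword starts (objective: alternative).


-- ===== PORT A =====
def pvKeywords : List String :=
  ["shipping and handling", "shipping charges", "shipping", "charges", "total",
   "grand total", "handling", "invoice summary", "tax summary", "authorized signatory",
   "signature", "declaration", "returns policy", "regd. office", "contact flipkart",
   "contact amazon", "customer care", "www.flipkart.com/helpcentre", "www.amazon.in"]

def clean_item_description (desc : Option String) : Option String :=
  match desc with
  | none => none            -- not isinstance(desc, str) → return desc
  | some d =>
    let descLower := PySem.Str.lower d
    let minIdx : Int := pvKeywords.foldl
      (fun m kw =>
        let idx := PySem.Str.find descLower kw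
        if idx ≠ -1 ∧ idx < m then idx else m)
      ((PySem.Str.len d : Int))
    some (if minIdx ≠ (PySem.Str.len d : Int)
          then PySem.Str.strip (PySem.Str.slice d none (some minIdx))
          else PySem.Str.strip d)

-- ===== PORT B =====
-- low.startswith(kws, i) for 0 ≤ i ≤ len(low) is exactly: some kw is a prefix of low[i:]
def pvMatchAt (low : String) (i : Nat) : Bool :=
  pvKeywords.any (fun kw => PySem.Chars.startswith (low.toList.drop i) kw.toList)

-- the 'for i in range(len(low))' loop of Source B
def pvScanB (d low : String) (i : Nat) : Option String :=
  if h : (i : Int) < PySem.Str.len low then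
    if pvMatchAt low i then
      some (PySem.Str.strip (PySem.Str.slice d none (some (i : Int))))
    else pvScanB d low (i + 1)
  else none
termination_by (PySem.Str.len low).toNat - i
decreasing_by omega

def clean_item_description_alt (desc : Option String) : Option String :=
  match desc with
  | none => none
  | some d =>
    let low := PySem.Str.lower d
    some ((pvScanB d low 0).getD (PySem.Str.strip d))

-- ===== PRECONDITION & SPEC =====
def Spec_clean_item_description (desc : Option String) (out : Option String) : Prop := out = clean_item_description_alt desc
instance (desc : Option String) (out : Option String) : Decidable (Spec_clean_item_description desc out) := by unfold Spec_clean_item_description; infer_instance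

-- ===== CLAIM (what is proved, stated in full; the proofs are below) =====
def Claim_equal_clean_item_description : Prop := ∀ (desc : Option String), Dom_clean_item_description desc → Spec_clean_item_description desc (clean_item_description desc)

-- ===== LEMMAS AND PROOFS =====

-- abbreviation for A's fold step over lowercase character list s
def pvStep (s : List Char) (m : Int) (kw : String) : Int :=
  if PySem.Chars.find s kw.toList ≠ -1 ∧ PySem.Chars.find s kw.toList < m
  then PySem.Chars.find s kw.toList else m

lemma pvFold_le (s : List Char) (kws : List String) (a : Int) :
    kws.foldl (pvStep s) a ≤ a := by
  induction kws generalizing a with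
  | nil => simp
  | cons kw tl ih =>
    simp only [List.foldl_cons]
    refine le_trans (ih _) ?_
    unfold pvStep
    split_ifs with h
    · exact le_of_lt h.2
    · exact le_refl a

lemma pvFold_mem (s : List Char) (kws : List String) (a : Int) :
    kws.foldl (pvStep s) a = a ∨
      ∃ kw ∈ kws, PySem.Chars.find s kw.toList = kws.foldl (pvStep s) a ∧
        0 ≤ kws.foldl (pvStep s) a := by
  induction kws generalizing a with
  | nil => simp
  | cons kw tl ih =>
    simp only [List.foldl_cons]
    rcases ih (pvStep s a kw) with h | ⟨kw', hmem, hfind, hnn⟩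
    · rw [h]
      unfold pvStep
      split_ifs with hc
      · exact Or.inr ⟨kw, by simp, rfl,
          by have := PySem.Chars.neg_one_le_find s kw.toList; omega⟩
      · exact Or.inl rfl
    · exact Or.inr ⟨kw', by simp [hmem], hfind, hnn⟩

lemma pvFold_min (s : List Char) (kws : List String) (a : Int) :
    ∀ kw ∈ kws, PySem.Chars.find s kw.toList = -1 ∨
      kws.foldl (pvStep s) a ≤ PySem.Chars.find s kw.toList := by
  induction kws generalizing a with
  | nil => simp
  | cons kw tl ih =>
    intro kw' hmem
    rcases List.mem_cons.mp hmem with h | h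
    · subst h
      by_cases hneg : PySem.Chars.find s kw'.toList = -1
      · exact Or.inl hneg
      · refine Or.inr ?_
        simp only [List.foldl_cons]
        refine le_trans (pvFold_le s tl _) ?_
        unfold pvStep
        split_ifs with hc
        · exact le_refl _
        · push_neg at hc
          exact hc hneg
    · simpa using ih (pvStep s a kw) kw' h

-- B's match predicate in Prop form
lemma pvMatchAt_iff (low : String) (i : Nat) :
    pvMatchAt low i = true ↔ ∃ kw ∈ pvKeywords, kw.toList <+: low.toList.drop i := by
  simp [pvMatchAt, List.any_eq_true, PySem.Chars.startswith_iff]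

lemma pvScanB_none (d low : String) (i : Nat)
    (h : ∀ j, i ≤ j → pvMatchAt low j = false) :
    pvScanB d low i = none := by
  unfold pvScanB
  split_ifs with hlt hmat
  · exact absurd hmat (by simp [h i le_rfl])
  · exact pvScanB_none d low (i + 1) (fun j hj => h j (by omega))
  · rfl
termination_by (PySem.Str.len low).toNat - i
decreasing_by omega

lemma pvScanB_some (d low : String) (i j : Nat)
    (hij : i ≤ j) (hj : (j : Int) < PySem.Str.len low)
    (hm : pvMatchAt low j = true)
    (hmin : ∀ k, i ≤ k → k < j → pvMatchAt low k = false) :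
    pvScanB d low i = some (PySem.Str.strip (PySem.Str.slice d none (some (j : Int)))) := by
  unfold pvScanB
  rcases Nat.lt_or_ge i j with hlt | hge
  · rw [dif_pos (by push_cast; omega), if_neg (by simp [hmin i le_rfl hlt])]
    exact pvScanB_some d low (i + 1) j (by omega) hj hm (fun k hk hk' => hmin k (by omega) hk')
  · have hij' : i = j := by omega
    subst hij'
    rw [dif_pos hj, if_pos hm]
termination_by j - i

-- a prefix of a drop is an infix, and conversely find minimality transfers
lemma pvInfix_of_prefix_drop {kw s : List Char} {j : Nat} (h : kw <+: s.drop j) :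
    kw <:+: s :=
  h.isInfix.trans (List.drop_suffix j s).isInfix

lemma pvKeywords_ne_nil : ∀ kw ∈ pvKeywords, kw.toList ≠ [] := by decide

-- ===== VERDICT (by name: the statement is the Claim_ definition above) =====
theorem clean_item_description_spec : Claim_equal_clean_item_description := by
  intro desc _
  unfold Spec_clean_item_description clean_item_description clean_item_description_alt
  match desc with
  | none => rfl
  | some d =>
    simp only [Option.some.injEq]
    set low := PySem.Str.lower d with hlow
    set s : List Char := low.toList with hs
    have hfind : ∀ kw : String, PySem.Str.find low kw = PySem.Chars.find s kw.toList := by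
      intro kw; simp [PySem.Str.find_eq, hs]
    have hstep : (fun (m : Int) (kw : String) =>
        let idx := PySem.Str.find low kw
        if idx ≠ -1 ∧ idx < m then idx else m) = pvStep s := by
      funext m kw; simp [pvStep, hs]
    rw [hstep]
    set n : Int := (PySem.Str.len d : Int) with hn
    set m : Int := pvKeywords.foldl (pvStep s) n with hm
    have hns : n = (s.length : Int) := by
      simp [hn, hs, hlow, PySem.Str.toList_lower, PySem.Str.len, PySem.Chars.len,
        PySem.Chars.lower]
    have hlenlow : PySem.Str.len low = s.length := by
      simp [hs, PySem.Str.len, PySem.Chars.len]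
    by_cases hall : ∀ kw ∈ pvKeywords, PySem.Chars.find s kw.toList = -1
    · -- no keyword occurs anywhere: A keeps m = n, B's scan returns none
      have hmn : m = n := by
        rcases pvFold_mem s pvKeywords n with h | ⟨kw, hmem, hfd, hnn⟩
        · exact h
        · rw [hall kw hmem] at hfd; omega
      have hscan : pvScanB d low 0 = none := by
        refine pvScanB_none d low 0 (fun j _ => ?_)
        by_contra hne
        have hb : pvMatchAt low j = true := by
          cases h : pvMatchAt low j with
          | false => exact absurd h hne
          | true => rfl
        obtain ⟨kw, hmem, hpre⟩ := (pvMatchAt_iff low j).mp hb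
        have : PySem.Chars.find s kw.toList ≠ -1 :=
          (PySem.Chars.find_ne_neg_one_iff _ _).mpr (pvInfix_of_prefix_drop hpre)
        exact this (hall kw hmem)
      rw [hscan]
      simp [hmn]
    · -- some keyword occurs: both sides truncate at the same minimal index
      push_neg at hall
      obtain ⟨kw0, hmem0, hne0⟩ := hall
      have hnn0 : 0 ≤ PySem.Chars.find s kw0.toList := by
        have := PySem.Chars.neg_one_le_find s kw0.toList; omega
      have hlt0 : PySem.Chars.find s kw0.toList < (s.length : Int) := by
        rcases lt_or_eq_of_le (PySem.Chars.find_le_length s kw0.toList) with h | h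
        · exact h
        · exfalso
          have hpre := (PySem.Chars.find_spec hnn0).1
          rw [h] at hpre
          simp only [Int.toNat_natCast, List.drop_length] at hpre
          exact pvKeywords_ne_nil kw0 hmem0 (List.prefix_nil.mp hpre)
      have hmlt : m < n := by
        rcases pvFold_min s pvKeywords n kw0 hmem0 with h | h
        · exact absurd h hne0
        · rw [hns]; omega
      have hmn : m ≠ n := ne_of_lt hmlt
      rcases pvFold_mem s pvKeywords n with h | ⟨kwm, hmemm, hfdm, hnnm⟩
      · exact absurd h hmn
      -- m is the find-index of kwm; it is the first position where any keyword matches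
      have hmlen : m.toNat < s.length := by omega
      have hmatchm : pvMatchAt low m.toNat = true := by
        refine (pvMatchAt_iff low m.toNat).mpr ⟨kwm, hmemm, ?_⟩
        have := (PySem.Chars.find_spec (show (0:Int) ≤ PySem.Chars.find s kwm.toList by omega)).1
        rwa [hfdm] at this
      have hminm : ∀ k, 0 ≤ k → k < m.toNat → pvMatchAt low k = false := by
        intro k _ hk
        cases h : pvMatchAt low k with
        | false => rfl
        | true =>
          exfalso
          obtain ⟨kw, hmem, hpre⟩ := (pvMatchAt_iff low k).mp h
          have hne : PySem.Chars.find s kw.toList ≠ -1 :=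
            (PySem.Chars.find_ne_neg_one_iff _ _).mpr (pvInfix_of_prefix_drop hpre)
          have hnnk : 0 ≤ PySem.Chars.find s kw.toList := by
            have := PySem.Chars.neg_one_le_find s kw.toList; omega
          have hle : (PySem.Chars.find s kw.toList).toNat ≤ k := by
            by_contra hgt
            exact (PySem.Chars.find_spec hnnk).2 k (by omega) hpre
          rcases pvFold_min s pvKeywords n kw hmem with h' | h'
          · exact hne h'
          · rw [← hm] at h'; omega
      have hscan : pvScanB d low 0 =
          some (PySem.Str.strip (PySem.Str.slice d none (some (m.toNat : Int)))) := by
        refine pvScanB_some d low 0 m.toNat (by omega) (by omega) hmatchm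
          (fun k hk hk' => hminm k hk hk')
      rw [hscan]
      have : ((m.toNat : Int)) = m := Int.toNat_of_nonneg (by omega)
      simp [hmn, this]
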